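-- pv_equiv track=rewrite | github.com/ynput/OpenPype | openpype/tools/assigner/model/model.py | _filter_docs_by_parent_id
-- ===== SOURCE A (Python) =====
-- import collections
--
-- def _filter_docs_by_parent_id(parent_ids, docs):
--     output = collections.defaultdict(list)
--     if not parent_ids:
--         return output
--     parent_ids = set(parent_ids)
--     for doc in docs:
--         parent_id = doc["parent"]
--         if parent_id in parent_ids:
--             output[parent_id].append(doc)
--     return output
-- ===== SOURCE B (Python) =====
-- import collections
--
-- def _filter_docs_by_parent_id(parent_ids, docs):
--     output = collections.defaultdict(list)
--     if not parent_ids: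
--         return output
--     wanted = set(parent_ids)
--     keys = [p for p in dict.fromkeys(d["parent"] for d in docs) if p in wanted]
--     for k in keys:
--         output[k] = [d for d in docs if d["parent"] == k]
--     return output
-- ===== Notes on version B (the rewrite author's own statement) =====
-- stated objective: alternative
-- what changed: B first computes the ordered distinct parent keys that occur in docs and are wanted (dict.fromkeys then a membership filter) and then builds each group with a per-key comprehension over docs, instead of A's single pass appending each doc into a defaultdict bucket.
import Mathlib
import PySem

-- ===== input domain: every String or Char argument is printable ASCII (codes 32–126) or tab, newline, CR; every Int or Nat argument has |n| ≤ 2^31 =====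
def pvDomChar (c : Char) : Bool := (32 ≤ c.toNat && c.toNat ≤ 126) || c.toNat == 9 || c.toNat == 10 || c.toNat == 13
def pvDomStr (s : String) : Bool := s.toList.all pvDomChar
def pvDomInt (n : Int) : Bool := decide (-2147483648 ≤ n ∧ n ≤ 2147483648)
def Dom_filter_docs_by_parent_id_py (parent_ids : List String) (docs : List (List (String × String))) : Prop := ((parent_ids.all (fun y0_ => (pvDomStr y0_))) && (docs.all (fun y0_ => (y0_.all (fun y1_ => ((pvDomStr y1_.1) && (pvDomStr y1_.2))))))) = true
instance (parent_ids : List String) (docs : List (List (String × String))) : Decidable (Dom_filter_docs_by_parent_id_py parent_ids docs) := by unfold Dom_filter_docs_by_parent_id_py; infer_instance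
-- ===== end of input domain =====

-- B replaces A's single-pass defaultdict grouping by a two-phase decomposition (ordered distinct
-- matching keys first, then a per-key scan of docs); a different, not faster, algorithm ("alternative").

-- ===== PORT A =====
def filter_docs_by_parent_id_py (parent_ids : List String) (docs : List (List (String × String))) : List (String × List (List (String × String))) :=
  let output : PySem.Dict String (List (List (String × String))) := PySem.Dict.empty
  if parent_ids = [] then output.items
  else
    let pset := PySem.Set.ofList parent_ids
    (docs.foldl (fun out doc =>
        match (PySem.Dict.mk doc).get? "parent" with
        | none => out   -- doc["parent"] raises KeyError here; excluded by Pre_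
        | some parent_id =>
            if PySem.Set.contains pset parent_id then
              out.modify parent_id [] (fun l => l ++ [doc])   -- output[parent_id].append(doc)
            else out)
      output).items

-- ===== PORT B =====
def filter_docs_by_parent_id_py_alt (parent_ids : List String) (docs : List (List (String × String))) : List (String × List (List (String × String))) :=
  if parent_ids = [] then []
  else
    let wanted := PySem.Set.ofList parent_ids
    let keys := (PySem.List.dedup (docs.map (fun d => ((PySem.Dict.mk d).get? "parent").getD ""))).filter
        (fun p => PySem.Set.contains wanted p)
    (keys.foldl (fun out k =>
        out.insert k (docs.filter (fun d => ((PySem.Dict.mk d).get? "parent").getD "" == k)))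
      (PySem.Dict.empty : PySem.Dict String (List (List (String × String))))).items

-- ===== PRECONDITION & SPEC =====
-- Pre_ excludes docs lacking a "parent" key when parent_ids is nonempty: there A raises KeyError.
def Pre_filter_docs_by_parent_id_py (parent_ids : List String) (docs : List (List (String × String))) : Prop :=
  parent_ids = [] ∨ ∀ d ∈ docs, (PySem.Dict.mk d).contains "parent" = true
instance (parent_ids : List String) (docs : List (List (String × String))) : Decidable (Pre_filter_docs_by_parent_id_py parent_ids docs) := by unfold Pre_filter_docs_by_parent_id_py; infer_instance

def pvWitness_filter_docs_by_parent_id_py : List String × (List (List (String × String))) :=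
  (["p1", "p2"], [[("parent", "p1"), ("name", "x")], [("parent", "p3")], [("parent", "p1")]])

def Spec_filter_docs_by_parent_id_py (parent_ids : List String) (docs : List (List (String × String))) (out : List (String × List (List (String × String)))) : Prop := out = filter_docs_by_parent_id_py_alt parent_ids docs
instance (parent_ids : List String) (docs : List (List (String × String))) (out : List (String × List (List (String × String)))) : Decidable (Spec_filter_docs_by_parent_id_py parent_ids docs out) := by unfold Spec_filter_docs_by_parent_id_py; infer_instance

-- ===== CLAIM (what is proved, stated in full; the proofs are below) =====
def Claim_equal_filter_docs_by_parent_id_py : Prop := ∀ (parent_ids : List String) (docs : List (List (String × String))), Dom_filter_docs_by_parent_id_py parent_ids docs → Pre_filter_docs_by_parent_id_py parent_ids docs → Spec_filter_docs_by_parent_id_py parent_ids docs (filter_docs_by_parent_id_py parent_ids docs)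

-- ===== LEMMAS AND PROOFS =====

theorem pv_foldl_filter_ite {α σ : Type} (p : α → Bool) (f : σ → α → σ) :
    ∀ (l : List α) (init : σ),
      l.foldl (fun acc x => if p x then f acc x else acc) init = (l.filter p).foldl f init := by
  intro l
  induction l with
  | nil => intro init; rfl
  | cons x xs ih =>
      intro init
      by_cases h : p x = true <;> simp [h, ih]

theorem pv_ofList_filter {α : Type} [BEq α] [LawfulBEq α] (p : α → Bool) (xs : List α) :
    PySem.Set.ofList (xs.filter p) = (PySem.Set.ofList xs).filter p := by
  induction xs using List.reverseRecOn with
  | nil => rfl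
  | append_singleton xs x ih =>
      rw [PySem.Set.ofList_append_singleton, List.filter_append]
      by_cases hp : p x = true <;>
        by_cases hc : x ∈ xs <;>
          simp [PySem.Set.add, List.filter_append, hp, hc, List.mem_filter, ih,
                PySem.Set.ofList_append_singleton]

theorem pv_main (parent_ids : List String) (docs : List (List (String × String)))
    (hid : parent_ids ≠ [])
    (hdoc : ∀ d ∈ docs, (PySem.Dict.mk d).contains "parent" = true) :
    filter_docs_by_parent_id_py parent_ids docs = filter_docs_by_parent_id_py_alt parent_ids docs := by
  unfold filter_docs_by_parent_id_py filter_docs_by_parent_id_py_alt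
  simp only [if_neg hid]
  set pkey : List (String × String) → String := fun d => ((PySem.Dict.mk d).get? "parent").getD "" with hpk
  set wanted : PySem.Set String := PySem.Set.ofList parent_ids with hw
  -- A's fold: replace the match by the total pkey form (valid on members of docs by hdoc)
  have h1 : (docs.foldl (fun out doc =>
        match (PySem.Dict.mk doc).get? "parent" with
        | none => out
        | some parent_id =>
            if wanted.contains parent_id then out.modify parent_id [] (fun l => l ++ [doc]) else out)
        (PySem.Dict.empty : PySem.Dict String (List (List (String × String)))))
      = docs.foldl (fun out doc =>
          if wanted.contains (pkey doc) then out.modify (pkey doc) [] (fun l => l ++ [doc]) else out)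
          PySem.Dict.empty := by
    apply PySem.List.foldl_congr_mem'
    intro d hd acc
    have hc := hdoc d hd
    rw [PySem.Dict.contains_eq_isSome_get?] at hc
    cases hg : (PySem.Dict.mk d).get? "parent" with
    | none => rw [hg] at hc; simp at hc
    | some pid => simp [hpk, hg]
  have h2 := pv_foldl_filter_ite (fun d => wanted.contains (pkey d))
        (fun out d => out.modify (pkey d) [] (fun l => l ++ [d])) docs
        (PySem.Dict.empty : PySem.Dict String (List (List (String × String))))
  rw [h1, h2]
  set dlist := docs.filter (fun d => wanted.contains (pkey d)) with hdl
  set D := dlist.foldl (fun out d => out.modify (pkey d) [] (fun l => l ++ [d])) (PySem.Dict.empty : PySem.Dict String (List (List (String × String)))) with hD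
  have hkeys : D.keys = PySem.Set.ofList (dlist.map pkey) := by
    have := PySem.Dict.keys_foldl_modify_key dlist pkey ([] : List (List (String × String)))
      (fun _ x => fun l => l ++ [x]) PySem.Dict.empty
    simpa [PySem.Set.update_nil_left] using this
  have hnd : D.keys.Nodup := by
    apply PySem.Dict.nodup_keys_foldl_modify_key dlist pkey ([] : List (List (String × String)))
      (fun _ x => fun l => l ++ [x]) PySem.Dict.empty
    simp
  have hgetD : ∀ k, D.getD k [] = dlist.filter (fun d => pkey d == k) := by
    intro k
    have hfm : D = (dlist.map (fun d => (pkey d, d))).foldl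
        (fun d p => d.modify p.1 [] (fun x => x ++ [p.2])) PySem.Dict.empty := by
      rw [List.foldl_map]
    rw [hfm, PySem.Dict.getD_foldl_modify_append]
    simp [List.filter_map, Function.comp_def, List.map_id']
  have hkeq : D.keys = (PySem.List.dedup (docs.map pkey)).filter (fun p => wanted.contains p) := by
    rw [hkeys, PySem.List.dedup_eq_ofList]
    have hmf : dlist.map pkey = (docs.map pkey).filter (fun s => wanted.contains s) := by
      rw [hdl]
      simpa [Function.comp] using
        (List.filter_map (f := pkey) (p := fun s => wanted.contains s) (l := docs)).symm
    rw [hmf, pv_ofList_filter]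
  have hval : ∀ k ∈ D.keys, dlist.filter (fun d => pkey d == k) = docs.filter (fun d => pkey d == k) := by
    intro k hk
    have hkw : k ∈ wanted := by
      rw [hkeq] at hk
      exact (PySem.Set.contains_iff _ _).mp (List.mem_filter.mp hk).2
    rw [hdl, List.filter_filter]
    apply List.filter_congr
    intro d _
    cases hpd : (pkey d == k) with
    | false => simp
    | true =>
        have : pkey d = k := eq_of_beq hpd
        simp [this, hkw]
  -- B's fold over fresh distinct keys appends
  have hnodB : ((PySem.List.dedup (docs.map pkey)).filter (fun p => wanted.contains p)).Nodup :=
    (PySem.List.nodup_dedup (docs.map pkey)).filter _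
  have hB : ((((PySem.List.dedup (docs.map pkey)).filter (fun p => wanted.contains p)).foldl
        (fun out k => out.insert k (docs.filter (fun d => pkey d == k)))
        (PySem.Dict.empty : PySem.Dict String (List (List (String × String))))).items)
      = ((PySem.List.dedup (docs.map pkey)).filter (fun p => wanted.contains p)).map
          (fun k => (k, docs.filter (fun d => pkey d == k))) := by
    have := PySem.Dict.items_foldl_insert_fresh
      ((PySem.List.dedup (docs.map pkey)).filter (fun p => wanted.contains p))
      (fun a => a) (fun k => docs.filter (fun d => pkey d == k))
      (PySem.Dict.empty : PySem.Dict String (List (List (String × String))))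
      (fun a _ => by simp) (by simpa [List.map_id] using hnodB)
    simpa using this
  rw [hB, PySem.Dict.items_eq_map_keys D hnd ([] : List (List (String × String))), hkeq]
  apply List.map_congr_left
  intro k hk
  rw [hgetD k, hval k (by rw [hkeq]; exact hk)]

-- ===== VERDICT (by name: the statement is the Claim_ definition above) =====
theorem filter_docs_by_parent_id_py_spec : Claim_equal_filter_docs_by_parent_id_py := by
  intro parent_ids docs _ hpre
  unfold Spec_filter_docs_by_parent_id_py
  by_cases hid : parent_ids = []
  · simp [filter_docs_by_parent_id_py, filter_docs_by_parent_id_py_alt, hid]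
    rfl
  · exact pv_main parent_ids docs hid (hpre.resolve_left hid)
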